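-- pv_equiv track=rewrite | github.com/linorcohen/Intro2cs | Exercises/Ex5/wordsearch.py | diagonal_raise
-- ===== SOURCE A (Python) =====
-- def diagonal_raise(columns, matrix, columns_direction):
--     """
--     This function returns a list of organized matrix lines joined in the
--     direction of diagonal raise left or right according to the columns_direction.
--     :param columns: number of columns in matrix
--     :type columns: int
--     :param matrix: 2D list of the matrix letters
--     :type matrix: list[list[str]]
--     :param columns_direction: list of columns direction
--     :type columns_direction: list[int]
--     :return: list of organized matrix lines joined
--     :rtype: list[str]
--     """
--     # [1,2,3]      rise right                  rise left
--     # [4,5,6] ---> ['1','42','753','86','9'] / ['3','62','951','84','7']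
--     # [7,8,9]
--     rows = len(matrix)
--     diagonal_matrix = [[] for i in range(rows + columns - 1)]
--     diagonal_matrix_index = 0
--     for i in columns_direction:
--         m = diagonal_matrix_index
--         for j in range(rows):
--             diagonal_matrix[m].append(matrix[j][i])
--             m += 1
--         diagonal_matrix_index += 1
--     return [''.join(lst) for lst in diagonal_matrix]
-- ===== SOURCE B (Python) =====
-- def diagonal_raise(columns, matrix, columns_direction):
--     """Output-driven gather: build each diagonal string directly."""
--     rows = len(matrix)
--     return [''.join(matrix[d - c][columns_direction[c]]
--                     for c in range(len(columns_direction))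
--                     if 0 <= d - c < rows)
--             for d in range(rows + columns - 1)]
-- ===== Notes on version B (the rewrite author's own statement) =====
-- stated objective: alternative
-- what changed: Replaced A's scatter (allocate all diagonal buckets, then push each column's letters into successive buckets with a running index) by an output-driven gather that builds each diagonal string d directly from matrix[d-c][columns_direction[c]] for valid c.
import Mathlib
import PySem

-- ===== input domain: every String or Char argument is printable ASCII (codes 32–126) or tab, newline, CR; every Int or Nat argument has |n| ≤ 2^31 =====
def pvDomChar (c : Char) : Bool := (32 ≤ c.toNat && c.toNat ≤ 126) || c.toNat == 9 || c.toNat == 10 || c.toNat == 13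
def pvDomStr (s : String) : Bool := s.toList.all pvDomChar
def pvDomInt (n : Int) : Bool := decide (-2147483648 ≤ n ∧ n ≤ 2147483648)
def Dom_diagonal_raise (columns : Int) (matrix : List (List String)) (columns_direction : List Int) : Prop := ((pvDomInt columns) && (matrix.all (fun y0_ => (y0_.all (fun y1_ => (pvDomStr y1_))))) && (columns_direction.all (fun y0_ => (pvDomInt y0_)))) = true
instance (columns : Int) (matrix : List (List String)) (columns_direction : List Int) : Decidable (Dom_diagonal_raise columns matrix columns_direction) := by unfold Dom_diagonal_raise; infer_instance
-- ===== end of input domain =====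

-- B replaces A's scatter into pre-allocated diagonal buckets by a direct per-diagonal gather
-- (same cost; objective: alternative); return values proved equal on Pre_.

-- ===== PORT A =====
-- inner-loop step: diagonal_matrix[m].append(matrix[j][i]); m += 1
def pvStep (matrix : List (List String)) (i : Int) (st2 : List (List String) × Nat) (j : Nat) : List (List String) × Nat :=
  (st2.1.set st2.2 ((st2.1.getD st2.2 []) ++ [PySem.List.pyGetD (matrix.getD j []) i ""]), st2.2 + 1)

-- outer-loop body: m = diagonal_matrix_index; for j in range(rows): …; diagonal_matrix_index += 1
def pvOStep (matrix : List (List String)) (st : List (List String) × Nat) (i : Int) : List (List String) × Nat :=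
  let inner := (List.range matrix.length).foldl (pvStep matrix i) (st.1, st.2)
  (inner.1, st.2 + 1)

def diagonal_raise (columns : Int) (matrix : List (List String)) (columns_direction : List Int) : List String :=
  let rows := matrix.length
  let dm0 : List (List String) := List.replicate ((rows + columns - 1 : Int)).toNat []
  let final := columns_direction.foldl (pvOStep matrix) (dm0, 0)
  final.1.map (fun lst => PySem.Str.join "" lst)

-- ===== PORT B =====
-- gather: for each diagonal index d, collect matrix[d-c][columns_direction[c]] for valid c
def diagonal_raise_alt (columns : Int) (matrix : List (List String)) (columns_direction : List Int) : List String :=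
  let rows := matrix.length
  (List.range ((rows + columns - 1 : Int)).toNat).map (fun (d : Nat) =>
    PySem.Str.join "" ((List.range columns_direction.length).filterMap (fun (c : Nat) =>
      if 0 ≤ (d : Int) - (c : Int) ∧ (d : Int) - (c : Int) < (rows : Int) then
        some (PySem.List.pyGetD (matrix.getD (d - c) []) (columns_direction.getD c 0) "")
      else none)))

-- ===== PRECONDITION & SPEC =====
-- Pre_ is exactly where Python A returns: enough diagonal buckets for every append (else
-- IndexError) and every matrix[j][i] index valid under Python's negative-index rule.
def Pre_diagonal_raise (columns : Int) (matrix : List (List String)) (columns_direction : List Int) : Prop :=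
  (columns_direction = [] ∨ matrix = [] ∨ (columns_direction.length : Int) ≤ columns) ∧
  ∀ r ∈ matrix, ∀ i ∈ columns_direction, -(r.length : Int) ≤ i ∧ i < (r.length : Int)
instance (columns : Int) (matrix : List (List String)) (columns_direction : List Int) : Decidable (Pre_diagonal_raise columns matrix columns_direction) := by unfold Pre_diagonal_raise; infer_instance

def pvWitness_diagonal_raise : Int × List (List String) × List Int :=
  (3, [["a","b","c"],["d","e","f"],["g","h","i"]], [0, 1, 2])

def Spec_diagonal_raise (columns : Int) (matrix : List (List String)) (columns_direction : List Int) (out : List String) : Prop := out = diagonal_raise_alt columns matrix columns_direction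
instance (columns : Int) (matrix : List (List String)) (columns_direction : List Int) (out : List String) : Decidable (Spec_diagonal_raise columns matrix columns_direction out) := by unfold Spec_diagonal_raise; infer_instance

-- ===== CLAIM (what is proved, stated in full; the proofs are below) =====
def Claim_equal_diagonal_raise : Prop := ∀ (columns : Int) (matrix : List (List String)) (columns_direction : List Int), Dom_diagonal_raise columns matrix columns_direction → Pre_diagonal_raise columns matrix columns_direction → Spec_diagonal_raise columns matrix columns_direction (diagonal_raise columns matrix columns_direction)

-- ===== LEMMAS AND PROOFS =====

-- what bucket d holds after A has processed the columns of cd starting at bucket offset idx0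
def pvGather (matrix : List (List String)) (cd : List Int) (idx0 d : Nat) : List String :=
  (List.range cd.length).filterMap (fun c =>
    if idx0 + c ≤ d ∧ d < idx0 + c + matrix.length then
      some (PySem.List.pyGetD (matrix.getD (d - (idx0 + c)) []) (cd.getD c 0) "") else none)

theorem pv_self_map (dm : List (List String)) :
    (List.range dm.length).map (fun d => dm.getD d []) = dm := by
  apply List.ext_getElem
  · simp
  · intro d h1 h2
    simp [List.getD_eq_getElem?_getD, List.getElem?_eq_getElem h2]

theorem pv_inner (matrix : List (List String)) (i : Int) (n : Nat) (dm : List (List String)) (m0 : Nat) :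
    (List.range n).foldl (pvStep matrix i) (dm, m0)
      = ((List.range dm.length).map (fun d =>
          dm.getD d [] ++ (if m0 ≤ d ∧ d < m0 + n then
            [PySem.List.pyGetD (matrix.getD (d - m0) []) i ""] else [])), m0 + n) := by
  induction n with
  | zero =>
    simp only [List.range_zero, List.foldl_nil]
    have hfun : (fun d => dm.getD d [] ++ if m0 ≤ d ∧ d < m0 + 0 then [PySem.List.pyGetD (matrix.getD (d - m0) []) i ""] else []) = (fun d => dm.getD d []) := by
      funext d; rw [if_neg (by omega), List.append_nil]
    rw [hfun, pv_self_map, Nat.add_zero]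
  | succ n ih =>
    rw [List.range_succ, List.foldl_append, ih]
    simp only [List.foldl_cons, List.foldl_nil, pvStep]
    refine Prod.ext ?_ (by simp; omega)
    simp only
    apply List.ext_getElem
    · simp
    · intro d hd1 hd2
      simp only [List.length_map, List.length_range] at hd2
      rw [List.getElem_set]
      by_cases hdm : d = m0 + n
      · subst hdm
        rw [if_pos (by simp)]
        have hget : ((List.range dm.length).map (fun d =>
            dm.getD d [] ++ (if m0 ≤ d ∧ d < m0 + n then
              [PySem.List.pyGetD (matrix.getD (d - m0) []) i ""] else []))).getD (m0 + n) []
            = dm.getD (m0 + n) [] := by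
          rw [List.getD_eq_getElem?_getD, List.getElem?_map]
          rw [List.getElem?_range (by omega)]
          simp only [Option.map_some, Option.getD_some]
          rw [if_neg (by omega), List.append_nil]
        rw [hget]
        simp only [List.getElem_map, List.getElem_range]
        rw [if_pos (by omega)]
        simp
      · rw [if_neg (by omega)]
        simp only [List.getElem_map, List.getElem_range]
        by_cases hc : m0 ≤ d ∧ d < m0 + n
        · rw [if_pos hc, if_pos (by omega)]
        · rw [if_neg hc, if_neg (by omega)]

theorem pv_outer (matrix : List (List String)) (cd : List Int) :
    ∀ (dm : List (List String)) (idx0 : Nat),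
    (cd.foldl (pvOStep matrix) (dm, idx0)).1
      = (List.range dm.length).map (fun d => dm.getD d [] ++ pvGather matrix cd idx0 d) := by
  induction cd with
  | nil =>
    intro dm idx0
    simp only [List.foldl_nil, pvGather, List.length_nil, List.range_zero, List.filterMap_nil,
      List.append_nil]
    exact (pv_self_map dm).symm
  | cons i rest ih =>
    intro dm idx0
    have hstep : pvOStep matrix (dm, idx0) i
        = ((List.range dm.length).map (fun d => dm.getD d [] ++
            (if idx0 ≤ d ∧ d < idx0 + matrix.length then
              [PySem.List.pyGetD (matrix.getD (d - idx0) []) i ""] else [])), idx0 + 1) := by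
      simp only [pvOStep, pv_inner]
    rw [List.foldl_cons, hstep, ih]
    simp only [List.length_map, List.length_range]
    apply List.ext_getElem
    · simp
    · intro d h1 h2
      simp only [List.getElem_map, List.getElem_range]
      have hget : ((List.range dm.length).map (fun d =>
          dm.getD d [] ++ (if idx0 ≤ d ∧ d < idx0 + matrix.length then
            [PySem.List.pyGetD (matrix.getD (d - idx0) []) i ""] else []))).getD d []
          = dm.getD d [] ++ (if idx0 ≤ d ∧ d < idx0 + matrix.length then
            [PySem.List.pyGetD (matrix.getD (d - idx0) []) i ""] else []) := by
        rw [List.getD_eq_getElem?_getD, List.getElem?_map, List.getElem?_range (by simpa using h2)]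
        simp
      rw [hget, List.append_assoc]
      congr 1
      -- now: ite ++ pvGather rest (idx0+1) d = pvGather (i::rest) idx0 d
      simp only [pvGather, List.length_cons, List.range_succ_eq_map, List.filterMap_cons,
        List.filterMap_map, Nat.add_zero, List.getD_cons_zero]
      by_cases hc : idx0 ≤ d ∧ d < idx0 + matrix.length
      · rw [if_pos hc, if_pos hc]
        simp only [List.singleton_append]
        congr 1
        apply List.filterMap_congr
        intro c _
        simp only [Function.comp_apply, List.getD_cons_succ]
        by_cases h3 : idx0 + 1 + c ≤ d ∧ d < idx0 + 1 + c + matrix.length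
        · rw [if_pos h3, if_pos (by omega)]
          have he : d - (idx0 + (c + 1)) = d - (idx0 + 1 + c) := by omega
          rw [he]
        · rw [if_neg h3, if_neg (by omega)]
      · rw [if_neg hc, if_neg hc]
        simp only [List.nil_append]
        apply List.filterMap_congr
        intro c _
        simp only [Function.comp_apply, List.getD_cons_succ]
        by_cases h3 : idx0 + 1 + c ≤ d ∧ d < idx0 + 1 + c + matrix.length
        · rw [if_pos h3, if_pos (by omega)]
          have he : d - (idx0 + (c + 1)) = d - (idx0 + 1 + c) := by omega
          rw [he]
        · rw [if_neg h3, if_neg (by omega)]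

theorem pv_main (columns : Int) (matrix : List (List String)) (cd : List Int) :
    diagonal_raise columns matrix cd = diagonal_raise_alt columns matrix cd := by
  unfold diagonal_raise diagonal_raise_alt
  simp only
  rw [pv_outer]
  rw [List.length_replicate, List.map_map]
  apply List.map_congr_left
  intro d _
  simp only [Function.comp_apply]
  have hrep : (List.replicate (((matrix.length : Int) + columns - 1)).toNat ([] : List String)).getD d [] = [] := by
    rcases Nat.lt_or_ge d (((matrix.length : Int) + columns - 1)).toNat with h | h
    · rw [List.getD_eq_getElem?_getD, List.getElem?_eq_getElem (by rw [List.length_replicate]; exact h)]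
      simp
    · rw [List.getD_eq_getElem?_getD, List.getElem?_eq_none (by rw [List.length_replicate]; exact h)]
      simp
  rw [hrep, List.nil_append]
  congr 1
  simp only [pvGather]
  apply List.filterMap_congr
  intro c _
  by_cases h : (0 : Int) ≤ (d : Int) - (c : Int) ∧ (d : Int) - (c : Int) < (matrix.length : Int)
  · rw [if_pos (by omega), if_pos h]
    have he : d - (0 + c) = d - c := by omega
    rw [he]
  · rw [if_neg (by omega), if_neg h]

-- ===== VERDICT (by name: the statement is the Claim_ definition above) =====
theorem diagonal_raise_spec : Claim_equal_diagonal_raise := by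
  intro columns matrix cd _ _
  unfold Spec_diagonal_raise
  exact pv_main columns matrix cd
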